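-- pv_equiv track=rewrite | github.com/ben-jamming/COMP-424 | N-Queens.py | TotalCollisions
-- ===== SOURCE A (Python) =====
-- def TotalCollisions(i, queens):
--     """Returns the total number of collisions on diagonals for the ith queen."""
--     collisions = 0
--     current_queen_row = queens[i]
--
--     # Check all other queens
--     for j in range(len(queens)):
--         if i == j:  # Skip the current queen
--             continue
--         other_queen_row = queens[j]
--
--         # Check for negative slope diagonal
--         if current_queen_row + i == other_queen_row + j:
--             collisions += 1
--
--         # Check for positive slope diagonal
--         if current_queen_row - i == other_queen_row - j:
--             collisions += 1
--
--     return collisions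
-- ===== SOURCE B (Python) =====
-- def TotalCollisions(i, queens):
--     """Returns the total number of collisions on diagonals for the ith queen."""
--     anti = {}
--     main = {}
--     for j, row in enumerate(queens):
--         if j != i:  # tabulate every *other* queen's diagonals
--             anti[row + j] = anti.get(row + j, 0) + 1
--             main[row - j] = main.get(row - j, 0) + 1
--     cur = queens[i]
--     return anti.get(cur + i, 0) + main.get(cur - i, 0)
-- ===== Notes on version B (the rewrite author's own statement) =====
-- stated objective: alternative
-- what changed: B replaces A's accumulator loop comparing queen i against every other queen by one tabulating pass that builds two dicts counting the other queens per anti- and main-diagonal, then answers with two dict lookups.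
import Mathlib
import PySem

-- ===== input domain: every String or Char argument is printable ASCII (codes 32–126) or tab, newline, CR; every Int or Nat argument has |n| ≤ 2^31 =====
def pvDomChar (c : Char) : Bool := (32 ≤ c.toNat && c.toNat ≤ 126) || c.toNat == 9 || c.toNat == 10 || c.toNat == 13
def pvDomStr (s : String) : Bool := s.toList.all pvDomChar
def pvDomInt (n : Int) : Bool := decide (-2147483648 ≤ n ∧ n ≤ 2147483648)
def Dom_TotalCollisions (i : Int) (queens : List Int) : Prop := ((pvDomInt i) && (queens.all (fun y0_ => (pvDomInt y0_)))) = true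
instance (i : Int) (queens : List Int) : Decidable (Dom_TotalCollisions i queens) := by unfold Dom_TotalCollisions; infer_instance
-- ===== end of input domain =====

-- B tabulates the other queens' diagonals in two dicts in one pass and answers with two lookups (return value only; neither version mutates its arguments).

-- ===== PORT A =====
def TotalCollisions (i : Int) (queens : List Int) : Int :=
  match PySem.List.pyGet? queens i with
  | none => 0  -- IndexError in Python; excluded by Pre_
  | some current_queen_row =>
    (PySem.List.pyRange 0 queens.length 1).foldl (fun collisions j =>
      if i = j then collisions  -- skip the current queen
      else
        -- j ∈ range(len(queens)) is always in range, so pyGetD is exact here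
        let other_queen_row := PySem.List.pyGetD queens j 0
        let c1 := if current_queen_row + i = other_queen_row + j then collisions + 1 else collisions
        if current_queen_row - i = other_queen_row - j then c1 + 1 else c1) 0

-- ===== PORT B =====
def TotalCollisions_alt (i : Int) (queens : List Int) : Int :=
  let ds := (PySem.List.enumerate queens 0).foldl
    (fun (p : PySem.Dict Int Int × PySem.Dict Int Int) jr =>
      if jr.1 ≠ i then
        (p.1.insert (jr.2 + jr.1) (p.1.getD (jr.2 + jr.1) 0 + 1),
         p.2.insert (jr.2 - jr.1) (p.2.getD (jr.2 - jr.1) 0 + 1))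
      else p)
    (PySem.Dict.empty, PySem.Dict.empty)
  match PySem.List.pyGet? queens i with
  | none => 0  -- IndexError in Python; excluded by Pre_
  | some cur => ds.1.getD (cur + i) 0 + ds.2.getD (cur - i) 0

-- ===== PRECONDITION & SPEC =====
-- Pre_ is exactly the inputs where queens[i] does not raise IndexError: -len(queens) ≤ i < len(queens).
def Pre_TotalCollisions (i : Int) (queens : List Int) : Prop := PySem.Raise.InRange queens.length i
instance (i : Int) (queens : List Int) : Decidable (Pre_TotalCollisions i queens) := by unfold Pre_TotalCollisions; infer_instance
def pvWitness_TotalCollisions : Int × List Int := (1, [0, 2, 1])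

def Spec_TotalCollisions (i : Int) (queens : List Int) (out : Int) : Prop := out = TotalCollisions_alt i queens
instance (i : Int) (queens : List Int) (out : Int) : Decidable (Spec_TotalCollisions i queens out) := by unfold Spec_TotalCollisions; infer_instance

-- ===== CLAIM (what is proved, stated in full; the proofs are below) =====
def Claim_equal_TotalCollisions : Prop := ∀ (i : Int) (queens : List Int), Dom_TotalCollisions i queens → Pre_TotalCollisions i queens → Spec_TotalCollisions i queens (TotalCollisions i queens)

-- ===== LEMMAS AND PROOFS =====

-- B's pair-of-dicts fold splits into two independent counting folds over the mapped, i-skipping key lists.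
lemma foldl_pair_counter (i : Int) (l : List (Int × Int)) (d1 d2 : PySem.Dict Int Int) :
    l.foldl (fun (p : PySem.Dict Int Int × PySem.Dict Int Int) jr =>
      if jr.1 ≠ i then
        (p.1.insert (jr.2 + jr.1) (p.1.getD (jr.2 + jr.1) 0 + 1),
         p.2.insert (jr.2 - jr.1) (p.2.getD (jr.2 - jr.1) 0 + 1))
      else p) (d1, d2)
    = (((l.filter (fun jr => jr.1 ≠ i)).map (fun jr => jr.2 + jr.1)).foldl
         (fun d x => d.insert x (d.getD x 0 + 1)) d1,
       ((l.filter (fun jr => jr.1 ≠ i)).map (fun jr => jr.2 - jr.1)).foldl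
         (fun d x => d.insert x (d.getD x 0 + 1)) d2) := by
  induction l generalizing d1 d2 with
  | nil => rfl
  | cons hd tl ih =>
    simp only [List.foldl_cons, List.filter_cons]
    simp only [ne_eq, ite_not, decide_not] at ih ⊢
    by_cases h : hd.1 = i <;> simp [h] <;> exact ih _ _

-- A's loop is the sum of the two skip-i counts over the index range.
lemma loopA_counts (i cur : Int) (g : Int → Int) (l : List Int) (acc : Int) :
    l.foldl (fun collisions j =>
      if i = j then collisions
      else
        let other := g j
        let c1 := if cur + i = other + j then collisions + 1 else collisions
        if cur - i = other - j then c1 + 1 else c1) acc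
    = acc + (l.countP (fun j => decide (i ≠ j ∧ cur + i = g j + j)) : Int)
          + (l.countP (fun j => decide (i ≠ j ∧ cur - i = g j - j)) : Int) := by
  induction l generalizing acc with
  | nil => simp
  | cons hd tl ih =>
    simp only [List.foldl_cons, List.countP_cons, ih]
    by_cases h : i = hd <;> split_ifs <;> simp_all <;> omega

-- ===== VERDICT (by name: the statement is the Claim_ definition above) =====
theorem TotalCollisions_spec : Claim_equal_TotalCollisions := by
  intro i queens _hdom hpre
  unfold Spec_TotalCollisions TotalCollisions TotalCollisions_alt
  cases hget : PySem.List.pyGet? queens i with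
  | none => exact absurd hpre ((PySem.List.pyGet?_eq_none_iff queens i).mp hget)
  | some cur =>
    dsimp only
    rw [loopA_counts i cur (fun j => PySem.List.pyGetD queens j 0), foldl_pair_counter]
    simp only [PySem.Dict.foldl_insert_getD_add_one_eq_counter, PySem.Dict.getD_counter,
      List.count_eq_countP, List.countP_map, List.countP_filter, Function.comp_def]
    rw [PySem.List.enumerate_eq_map_pyRange queens 0]
    simp only [List.countP_map, PySem.List.len, Function.comp_def]
    have c1 : (PySem.List.pyRange 0 queens.length 1).countP
        (fun j => decide (i ≠ j ∧ cur + i = PySem.List.pyGetD queens j 0 + j))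
      = (PySem.List.pyRange 0 queens.length 1).countP
          (fun j => (PySem.List.pyGetD queens j 0 + j == cur + i) && decide (j ≠ i)) :=
      List.countP_congr (fun x _ => by
        simp only [decide_eq_true_eq, Bool.and_eq_true, beq_iff_eq]
        constructor
        · rintro ⟨ha, hb⟩; exact ⟨hb.symm, by simpa using Ne.symm ha⟩
        · rintro ⟨hb, ha⟩; exact ⟨by simpa using Ne.symm (by simpa using ha), hb.symm⟩)
    have c2 : (PySem.List.pyRange 0 queens.length 1).countP
        (fun j => decide (i ≠ j ∧ cur - i = PySem.List.pyGetD queens j 0 - j))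
      = (PySem.List.pyRange 0 queens.length 1).countP
          (fun j => (PySem.List.pyGetD queens j 0 - j == cur - i) && decide (j ≠ i)) :=
      List.countP_congr (fun x _ => by
        simp only [decide_eq_true_eq, Bool.and_eq_true, beq_iff_eq]
        constructor
        · rintro ⟨ha, hb⟩; exact ⟨hb.symm, by simpa using Ne.symm ha⟩
        · rintro ⟨hb, ha⟩; exact ⟨by simpa using Ne.symm (by simpa using ha), hb.symm⟩)
    rw [c1, c2]
    omega
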